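-- pv_equiv track=rewrite | github.com/404281510/XYBot | plugins/lucky_draw.py | make_message
-- ===== SOURCE A (Python) =====
-- def make_message(wins, draw_name, draw_count, total_win_points, draw_cost):
--     name_max_len = 0
--     for win_name, win_points, win_symbol in wins:
--         if len(win_name) > name_max_len:
--             name_max_len = len(win_name)
--
--     begin_message = f"----XYBot抽奖----\n🥳恭喜你在 {draw_count}次 {draw_name}抽奖 中抽到了：\n\n"
--     lines = []
--     for _ in range(name_max_len + 2):
--         lines.append('')
--
--     begin_line = 0
--
--     one_line_length = 0
--
--     for win_name, win_points, win_symbol in wins: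
--         if one_line_length >= 10:
--             begin_line += name_max_len + 2
--             for _ in range(name_max_len + 2):
--                 lines.append('')
--             one_line_length = 0
--
--         lines[begin_line] += win_symbol
--         for i in range(begin_line + 1, begin_line + name_max_len + 1):
--             if i % (name_max_len + 2) <= len(win_name):
--                 lines[i] += "\u2004" + win_name[i % (name_max_len + 2) - 1]
--             else:
--                 lines[i] += win_symbol
--         lines[begin_line + name_max_len + 1] += win_symbol
--
--         one_line_length += 1
--
--     message = ''
--     message += begin_message
--     for line in lines:
--         message += line + '\n'
--
--     message += f"\n\n🎉总计赢取积分: {total_win_points}🎉\n🎉共计消耗积分：{draw_cost}🎉\n\n概率请自行查询菜单⚙️"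
--
--     return message
-- ===== SOURCE B (Python) =====
-- def make_message(wins, draw_name, draw_count, total_win_points, draw_cost):
--     name_max_len = max((len(n) for n, _, _ in wins), default=0)
--     height = name_max_len + 2
--
--     def column(name, symbol):
--         cells = [symbol]
--         for j in range(1, name_max_len + 1):
--             cells.append('\u2004' + name[j - 1] if j <= len(name) else symbol)
--         cells.append(symbol)
--         return cells
--
--     chunks = [wins[k:k + 10] for k in range(0, len(wins), 10)] or [[]]
--     body = ''
--     for chunk in chunks:
--         cols = [column(n, s) for n, _, s in chunk]
--         for r in range(height):
--             body += ''.join(col[r] for col in cols) + '\n'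
--
--     return (f"----XYBot抽奖----\n🥳恭喜你在 {draw_count}次 {draw_name}抽奖 中抽到了：\n\n"
--             + body
--             + f"\n\n🎉总计赢取积分: {total_win_points}🎉\n🎉共计消耗积分：{draw_cost}🎉\n\n概率请自行查询菜单⚙️")
-- ===== Notes on version B (the rewrite author's own statement) =====
-- stated objective: simpler
-- what changed: B replaces A's in-place mutation of a growing list of lines with index arithmetic (begin_line, i % (name_max_len+2)) by chunking the winners into groups of 10, rendering each winner as a self-contained column of cells, and joining matching cells row by row.
import Mathlib
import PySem

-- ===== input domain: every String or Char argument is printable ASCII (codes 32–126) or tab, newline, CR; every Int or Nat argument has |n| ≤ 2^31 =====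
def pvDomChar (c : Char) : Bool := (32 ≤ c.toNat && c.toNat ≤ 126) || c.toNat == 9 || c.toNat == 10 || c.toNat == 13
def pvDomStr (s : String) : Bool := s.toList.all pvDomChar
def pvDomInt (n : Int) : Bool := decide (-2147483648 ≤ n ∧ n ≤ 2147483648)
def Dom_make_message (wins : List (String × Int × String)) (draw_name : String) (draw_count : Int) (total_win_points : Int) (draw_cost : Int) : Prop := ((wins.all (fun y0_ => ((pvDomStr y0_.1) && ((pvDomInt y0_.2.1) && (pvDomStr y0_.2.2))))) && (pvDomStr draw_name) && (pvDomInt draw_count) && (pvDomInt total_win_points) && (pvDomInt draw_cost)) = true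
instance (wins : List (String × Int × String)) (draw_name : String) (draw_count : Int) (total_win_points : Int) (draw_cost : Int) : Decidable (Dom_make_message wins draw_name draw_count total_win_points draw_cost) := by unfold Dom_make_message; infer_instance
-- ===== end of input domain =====

-- B is a simpler decomposition: chunk the winners into consecutive groups of 10, render each
-- winner as a column of cells and join matching cells row by row, instead of A's in-place
-- index-arithmetic mutation of a growing list of lines.

-- ===== PORT A =====
-- string work is done on List Char (Lean's own String.append/length are kernel-opaque);
-- both f-strings: str(int) is PySem.Int.toChars
def mmHeader (draw_count : Int) (draw_name : String) : List Char :=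
  "----XYBot抽奖----\n🥳恭喜你在 ".toList ++ PySem.Int.toChars draw_count ++ "次 ".toList
    ++ draw_name.toList ++ "抽奖 中抽到了：\n\n".toList

def mmFooter (total_win_points draw_cost : Int) : List Char :=
  "\n\n🎉总计赢取积分: ".toList ++ PySem.Int.toChars total_win_points ++ "🎉\n🎉共计消耗积分：".toList
    ++ PySem.Int.toChars draw_cost ++ "🎉\n\n概率请自行查询菜单⚙️".toList

-- lines[i] += s  (every index A writes is < lines.length, so List.set/getD are exact)
def mmAppAt (ls : List (List Char)) (i : Nat) (s : List Char) : List (List Char) :=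
  ls.set i (ls.getD i [] ++ s)

-- the body of A's 'for win_name, win_points, win_symbol in wins' loop, named;
-- state = (lines, begin_line, one_line_length)
def mmStepA (n : Nat) (st : List (List Char) × Nat × Nat) (w : String × Int × String) :
    List (List Char) × Nat × Nat :=
  -- if one_line_length >= 10: append a fresh block of empty lines
  let st := if st.2.2 ≥ 10 then (st.1 ++ List.replicate (n + 2) ([] : List Char), st.2.1 + (n + 2), 0) else st
  let lines := mmAppAt st.1 st.2.1 w.2.2.toList
  -- for i in range(begin_line+1, begin_line+name_max_len+1)  (all indices are ≥ 0: Nat range is exact)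
  let lines := (List.range' (st.2.1 + 1) n).foldl (fun ls i =>
      if i % (n + 2) ≤ w.1.toList.length then
        mmAppAt ls i ('\u2004' :: [w.1.toList.getD (i % (n + 2) - 1) ' '])
      else mmAppAt ls i w.2.2.toList) lines
  let lines := mmAppAt lines (st.2.1 + n + 1) w.2.2.toList
  (lines, st.2.1, st.2.2 + 1)

def make_message (wins : List (String × Int × String)) (draw_name : String) (draw_count : Int) (total_win_points : Int) (draw_cost : Int) : String :=
  let name_max_len : Nat :=
    wins.foldl (fun acc w => if w.1.toList.length > acc then w.1.toList.length else acc) 0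
  let fin := wins.foldl (mmStepA name_max_len) (List.replicate (name_max_len + 2) ([] : List Char), 0, 0)
  let msg := fin.1.foldl (fun acc line => acc ++ line ++ ['\n']) (mmHeader draw_count draw_name)
  String.ofList (msg ++ mmFooter total_win_points draw_cost)

-- ===== PORT B =====
-- one winner's column of name_max_len+2 cells (Source B's 'column')
def mmColumn (n : Nat) (name sym : List Char) : List (List Char) :=
  [sym] ++ (List.range' 1 n).map (fun j => if j ≤ name.length then '\u2004' :: [name.getD (j - 1) ' '] else sym) ++ [sym]

-- [wins[k:k+10] for k in range(0, len(wins), 10)]: consecutive groups of 10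
def mmChunk10 {α : Type} : List α → List (List α)
  | [] => []
  | x :: xs => (x :: xs).take 10 :: mmChunk10 (xs.drop 9)
termination_by l => l.length
decreasing_by simp

def make_message_alt (wins : List (String × Int × String)) (draw_name : String) (draw_count : Int) (total_win_points : Int) (draw_cost : Int) : String :=
  -- max(lengths, default=0): lengths are ≥ 0, so folding max from 0 is exact
  let n : Nat := (wins.map (fun w => w.1.toList.length)).foldl max 0
  let chunks := if wins.isEmpty then [([] : List (String × Int × String))] else mmChunk10 wins
  let body := chunks.foldl (fun acc chunk =>
    let cols := chunk.map (fun w => mmColumn n w.1.toList w.2.2.toList)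
    (List.range' 0 (n + 2)).foldl
      (fun acc2 r => acc2 ++ (cols.map (fun col => col.getD r [])).flatten ++ ['\n']) acc) []
  String.ofList (mmHeader draw_count draw_name ++ body ++ mmFooter total_win_points draw_cost)

-- ===== PRECONDITION & SPEC =====
-- A is total: no Pre_
def Spec_make_message (wins : List (String × Int × String)) (draw_name : String) (draw_count : Int) (total_win_points : Int) (draw_cost : Int) (out : String) : Prop := out = make_message_alt wins draw_name draw_count total_win_points draw_cost
instance (wins : List (String × Int × String)) (draw_name : String) (draw_count : Int) (total_win_points : Int) (draw_cost : Int) (out : String) : Decidable (Spec_make_message wins draw_name draw_count total_win_points draw_cost out) := by unfold Spec_make_message; infer_instance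

-- ===== CLAIM (what is proved, stated in full; the proofs are below) =====
def Claim_equal_make_message : Prop := ∀ (wins : List (String × Int × String)) (draw_name : String) (draw_count : Int) (total_win_points : Int) (draw_cost : Int), Dom_make_message wins draw_name draw_count total_win_points draw_cost → Spec_make_message wins draw_name draw_count total_win_points draw_cost (make_message wins draw_name draw_count total_win_points draw_cost)

-- ===== LEMMAS AND PROOFS =====

-- the cell winner (name, sym) contributes to row r (1 ≤ r ≤ n)
def mmCell (_n : Nat) (name sym : List Char) (r : Nat) : List Char :=
  if r ≤ name.length then '\u2004' :: [name.getD (r - 1) ' '] else sym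
theorem mmAppAt_length (ls : List (List Char)) (i : Nat) (s : List Char) :
    (mmAppAt ls i s).length = ls.length := by simp [mmAppAt]

theorem getD_mmAppAt (ls : List (List Char)) (i : Nat) (s : List Char) (j : Nat) (hi : i < ls.length) :
    (mmAppAt ls i s).getD j [] = if j = i then ls.getD j [] ++ s else ls.getD j [] := by
  simp only [mmAppAt, List.getD, List.getElem?_set]
  by_cases h : j = i
  · subst h; simp [hi]
  · simp [Ne.symm h, h]

theorem mmAppAt_append (P M : List (List Char)) (r : Nat) (s : List Char) :
    mmAppAt (P ++ M) (P.length + r) s = P ++ mmAppAt M r s := by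
  induction P with
  | nil => simp [mmAppAt]
  | cons x xs ih =>
      have h : (x :: xs).length + r = (xs.length + r) + 1 := by simp; omega
      rw [h]
      show mmAppAt (x :: (xs ++ M)) ((xs.length + r) + 1) s = x :: (xs ++ mmAppAt M r s)
      simp only [mmAppAt, List.getD_cons_succ, List.set_cons_succ] at *
      rw [ih]

theorem length_foldAppAt (c : Nat → List Char) (js : List Nat) (ls : List (List Char)) :
    (js.foldl (fun ms r => mmAppAt ms r (c r)) ls).length = ls.length := by
  induction js generalizing ls with
  | nil => rfl
  | cons r rs ih => simp only [List.foldl_cons]; rw [ih, mmAppAt_length]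

theorem getD_foldAppAt (c : Nat → List Char) (js : List Nat) (ls : List (List Char))
    (hnd : js.Nodup) (hlt : ∀ r ∈ js, r < ls.length) (j : Nat) :
    (js.foldl (fun ms r => mmAppAt ms r (c r)) ls).getD j []
      = if j ∈ js then ls.getD j [] ++ c j else ls.getD j [] := by
  induction js generalizing ls with
  | nil => simp
  | cons r rs ih =>
      obtain ⟨hr, hnd'⟩ := List.nodup_cons.mp hnd
      simp only [List.foldl_cons]
      rw [ih _ hnd' (fun x hx => by rw [mmAppAt_length]; exact hlt x (List.mem_cons_of_mem _ hx))]
      rw [getD_mmAppAt _ _ _ _ (hlt r List.mem_cons_self)]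
      by_cases hjr : j = r
      · subst hjr
        simp [hr]
      · by_cases hj : j ∈ rs <;> simp [hj, hjr]

theorem mmColumn_length (n : Nat) (name sym : List Char) :
    (mmColumn n name sym).length = n + 2 := by simp [mmColumn]

theorem getD_mmColumn (n : Nat) (name sym : List Char) (j : Nat) (hj : j < n + 2) :
    (mmColumn n name sym).getD j []
      = if j = 0 ∨ j = n + 1 then sym else mmCell n name sym j := by
  rcases j with _ | k
  · simp [mmColumn]
  · have hcol : mmColumn n name sym
        = sym :: ((List.range' 1 n).map (fun j => if j ≤ name.length then '\u2004' :: [name.getD (j - 1) ' '] else sym) ++ [sym]) := by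
      simp [mmColumn]
    rw [hcol, List.getD_cons_succ]
    by_cases hk : k < n
    · rw [List.getD_append _ _ _ _ (by simp [hk])]
      have hkl : k < (List.range' 1 n).length := by simp [hk]
      have : (List.range' 1 n)[k]'hkl = 1 + k := by rw [List.getElem_range' hkl]; omega
      rw [List.getD_eq_getElem _ _ (by simp [hk]), List.getElem_map, this]
      have h1 : ¬(k + 1 = 0 ∨ k + 1 = n + 1) := by omega
      have h2 : 1 + k = k + 1 := by omega
      rw [if_neg h1, h2]; rfl
    · have hk' : k = n := by omega
      subst hk'
      rw [List.getD_append_right _ _ _ _ (by simp)]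
      simp

def mmBlockRows (n : Nat) (chunk : List (String × Int × String)) : List (List Char) :=
  (List.range' 0 (n + 2)).map
    (fun r => ((chunk.map (fun w => mmColumn n w.1.toList w.2.2.toList)).map (fun col => col.getD r [])).flatten)

theorem mmBlockRows_length (n : Nat) (c : List (String × Int × String)) :
    (mmBlockRows n c).length = n + 2 := by simp [mmBlockRows]

theorem mmBlockRows_nil (n : Nat) :
    mmBlockRows n [] = List.replicate (n + 2) ([] : List Char) := by
  simp [mmBlockRows, List.map_const']

theorem mmUpd_eq (n : Nat) (M : List (List Char)) (name sym : List Char) (hM : M.length = n + 2) :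
    mmAppAt ((List.range' 1 n).foldl (fun ls r => mmAppAt ls r (mmCell n name sym r))
        (mmAppAt M 0 sym)) (n + 1) sym
      = List.zipWith (· ++ ·) M (mmColumn n name sym) := by
  have hlen1 : (mmAppAt M 0 sym).length = n + 2 := by rw [mmAppAt_length, hM]
  have hlen2 : ((List.range' 1 n).foldl (fun ls r => mmAppAt ls r (mmCell n name sym r))
      (mmAppAt M 0 sym)).length = n + 2 := by rw [length_foldAppAt, hlen1]
  apply List.ext_getElem
  · rw [mmAppAt_length, hlen2, List.length_zipWith, hM, mmColumn_length]; omega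
  · intro j hjl hjr
    have hj : j < n + 2 := by rwa [mmAppAt_length, hlen2] at hjl
    have hjM : j < M.length := by omega
    have hjc : j < (mmColumn n name sym).length := by rw [mmColumn_length]; omega
    rw [List.getElem_zipWith]
    rw [← List.getD_eq_getElem _ ([] : List Char) hjl, ← List.getD_eq_getElem _ ([] : List Char) hjM,
        ← List.getD_eq_getElem _ ([] : List Char) hjc]
    rw [getD_mmAppAt _ _ _ _ (by omega)]
    rw [getD_foldAppAt _ _ _ (List.nodup_range' 1)
        (fun r hr => by rw [hlen1]; rcases List.mem_range'.mp hr with ⟨i, hi, rfl⟩; omega)]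
    rw [getD_mmAppAt _ _ _ _ (by omega)]
    rw [getD_mmColumn _ _ _ _ hj]
    have hmem : j ∈ List.range' 1 n ↔ 1 ≤ j ∧ j < 1 + n := by
      rw [List.mem_range']
      constructor
      · rintro ⟨i, hi, rfl⟩; omega
      · rintro ⟨h1, h2⟩; exact ⟨j - 1, by omega, by omega⟩
    by_cases h0 : j = 0
    · subst h0
      have : ¬(0 ∈ List.range' 1 n) := by rw [hmem]; omega
      simp [this]
    · by_cases hn1 : j = n + 1
      · subst hn1
        have : ¬(n + 1 ∈ List.range' 1 n) := by rw [hmem]; omega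
        simp [this]
      · have : j ∈ List.range' 1 n := by rw [hmem]; omega
        simp [this, h0, hn1]

theorem mmZip_blockRows (n : Nat) (p : List (String × Int × String)) (w : String × Int × String) :
    List.zipWith (· ++ ·) (mmBlockRows n p) (mmColumn n w.1.toList w.2.2.toList)
      = mmBlockRows n (p ++ [w]) := by
  apply List.ext_getElem
  · rw [List.length_zipWith, mmBlockRows_length, mmBlockRows_length, mmColumn_length]; omega
  · intro j hjl hjr
    have hj : j < n + 2 := by rwa [mmBlockRows_length] at hjr
    have hjc : j < (mmColumn n w.1.toList w.2.2.toList).length := by rw [mmColumn_length]; omega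
    rw [List.getElem_zipWith]
    simp only [mmBlockRows, List.getElem_map, List.getElem_range']
    simp only [List.map_append, List.flatten_append]
    simp [← List.getD_eq_getElem _ ([] : List Char) hjc]

theorem foldAppAt_shift (c : Nat → List Char) (js : List Nat) (P Ms : List (List Char)) :
    js.foldl (fun ls j => mmAppAt ls (P.length + j) (c j)) (P ++ Ms)
      = P ++ js.foldl (fun ls j => mmAppAt ls j (c j)) Ms := by
  induction js generalizing Ms with
  | nil => rfl
  | cons r rs ih => simp only [List.foldl_cons]; rw [mmAppAt_append, ih]

theorem mmUpdFull (n : Nat) (P M : List (List Char)) (name sym : List Char)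
    (hM : M.length = n + 2) (hdvd : (n + 2) ∣ P.length) :
    mmAppAt ((List.range' (P.length + 1) n).foldl (fun ls i =>
        if i % (n + 2) ≤ name.length then mmAppAt ls i ('\u2004' :: [name.getD (i % (n + 2) - 1) ' '])
        else mmAppAt ls i sym) (mmAppAt (P ++ M) P.length sym)) (P.length + n + 1) sym
      = P ++ List.zipWith (· ++ ·) M (mmColumn n name sym) := by
  obtain ⟨k, hk⟩ := hdvd
  have hmod : ∀ j, 1 ≤ j → j ≤ n → (P.length + j) % (n + 2) = j := by
    intro j h1 h2
    rw [hk, Nat.mul_add_mod]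
    exact Nat.mod_eq_of_lt (by omega)
  have hinit : mmAppAt (P ++ M) P.length sym = P ++ mmAppAt M 0 sym := by
    have := mmAppAt_append P M 0 sym
    simpa using this
  have hr : List.range' (P.length + 1) n = (List.range' 1 n).map (fun j => P.length + j) := by
    rw [List.range'_eq_map_range, List.range'_eq_map_range, List.map_map]
    apply List.map_congr_left
    intro x _
    simp; omega
  rw [hinit, hr, List.foldl_map]
  have hcong : (List.range' 1 n).foldl (fun ls j =>
        if (P.length + j) % (n + 2) ≤ name.length then
          mmAppAt ls (P.length + j) ('\u2004' :: [name.getD ((P.length + j) % (n + 2) - 1) ' '])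
        else mmAppAt ls (P.length + j) sym) (P ++ mmAppAt M 0 sym)
      = (List.range' 1 n).foldl (fun ls j => mmAppAt ls (P.length + j) (mmCell n name sym j))
          (P ++ mmAppAt M 0 sym) := by
    apply PySem.List.foldl_congr_mem
    intro acc j hj
    rcases List.mem_range'.mp hj with ⟨i, hi, rfl⟩
    rw [hmod _ (by omega) (by omega)]
    unfold mmCell
    split <;> rfl
  rw [hcong, foldAppAt_shift]
  have hfin : P.length + n + 1 = P.length + (n + 1) := by omega
  rw [hfin, mmAppAt_append]
  rw [mmUpd_eq n M name sym hM]

def mmChunkAux {α : Type} (p : List α) : List α → List (List α)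
  | [] => [p]
  | w :: ws => if p.length ≥ 10 then p :: mmChunkAux [w] ws else mmChunkAux (p ++ [w]) ws

theorem mmStepA_eq (n : Nat) (P : List (List Char)) (p : List (String × Int × String))
    (w : String × Int × String) (hdvd : (n + 2) ∣ P.length) :
    mmStepA n (P ++ mmBlockRows n p, P.length, p.length) w
      = if p.length ≥ 10 then
          ((P ++ mmBlockRows n p) ++ mmBlockRows n [w], P.length + (n + 2), 1)
        else (P ++ mmBlockRows n (p ++ [w]), P.length, p.length + 1) := by
  by_cases h : p.length ≥ 10
  · simp only [mmStepA, h, if_true]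
    have hrep : (P ++ mmBlockRows n p) ++ List.replicate (n + 2) ([] : List Char)
        = (P ++ mmBlockRows n p) ++ mmBlockRows n [] := by rw [mmBlockRows_nil]
    have hlen : P.length + (n + 2) = (P ++ mmBlockRows n p).length := by
      rw [List.length_append, mmBlockRows_length]
    simp only [hrep, hlen]
    rw [mmUpdFull n (P ++ mmBlockRows n p) (mmBlockRows n []) w.1.toList w.2.2.toList
        (mmBlockRows_length n []) (by rw [← hlen]; exact Nat.dvd_add hdvd dvd_rfl)]
    rw [mmZip_blockRows n [] w]
    simp
  · simp only [mmStepA, h, if_false]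
    rw [mmUpdFull n P (mmBlockRows n p) w.1.toList w.2.2.toList (mmBlockRows_length n p) hdvd]
    rw [mmZip_blockRows n p w]

theorem mmFoldA (n : Nat) (ws : List (String × Int × String)) :
    ∀ (P : List (List Char)) (p : List (String × Int × String)),
    p.length ≤ 10 → (n + 2) ∣ P.length →
    (ws.foldl (mmStepA n) (P ++ mmBlockRows n p, P.length, p.length)).1
      = P ++ (mmChunkAux p ws).flatMap (mmBlockRows n) := by
  induction ws with
  | nil => intro P p _ _; simp [mmChunkAux]
  | cons w ws ih =>
      intro P p hp hdvd
      simp only [List.foldl_cons, mmChunkAux]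
      rw [mmStepA_eq n P p w hdvd]
      by_cases h : p.length ≥ 10
      · simp only [h, if_true]
        have h1 : (1 : Nat) = ([w] : List (String × Int × String)).length := rfl
        have h2 : P.length + (n + 2) = (P ++ mmBlockRows n p).length := by
          rw [List.length_append, mmBlockRows_length]
        rw [h1, h2, ih (P ++ mmBlockRows n p) [w] (by simp)
            (by rw [List.length_append, mmBlockRows_length]; exact Nat.dvd_add hdvd dvd_rfl)]
        simp [List.append_assoc]
      · simp only [h, if_false]
        have h1 : p.length + 1 = (p ++ [w]).length := by simp
        rw [h1, ih P (p ++ [w]) (by simp; omega) hdvd]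

theorem mmChunkAux_eq_chunk10 {α : Type} (ws : List α) :
    ∀ p : List α, 0 < p.length → p.length ≤ 10 → mmChunkAux p ws = mmChunk10 (p ++ ws) := by
  induction ws with
  | nil =>
      rintro (_ | ⟨a, p'⟩) h0 h10
      · simp at h0
      · simp only [mmChunkAux, List.append_nil]
        rw [mmChunk10]
        rw [List.take_of_length_le h10, List.drop_eq_nil_of_le (by simp at h10 ⊢; omega)]
        rw [mmChunk10]
  | cons w ws ih =>
      rintro (_ | ⟨a, p'⟩) h0 h10
      · simp at h0
      · simp only [mmChunkAux]
        by_cases h : (a :: p').length ≥ 10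
        · have hlen : (a :: p').length = 10 := by omega
          rw [if_pos h, ih [w] (by simp) (by simp)]
          show _ = mmChunk10 (a :: (p' ++ w :: ws))
          rw [mmChunk10]
          have hp9 : p'.length = 9 := by simp at hlen; omega
          congr 1
          · rw [List.take_succ_cons, List.take_append,
                List.take_of_length_le (by omega), hp9]
            simp
          · congr 1
            rw [List.drop_append, List.drop_eq_nil_of_le (by omega), hp9]
            simp
        · rw [if_neg h, ih ((a :: p') ++ [w]) (by simp) (by simp at h ⊢; omega)]
          rw [List.append_assoc]
          rfl

theorem mmFoldNl {α : Type} (l : List α) (f : α → List Char) (init : List Char) :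
    l.foldl (fun a x => a ++ f x ++ ['\n']) init = init ++ l.flatMap (fun x => f x ++ ['\n']) := by
  induction l generalizing init with
  | nil => simp
  | cons x xs ih =>
      simp only [List.foldl_cons, List.flatMap_cons]
      rw [ih]
      simp [List.append_assoc]

theorem mmBodyB (n : Nat) (chunks : List (List (String × Int × String))) (init : List Char) :
    chunks.foldl (fun acc chunk =>
      let cols := chunk.map (fun w => mmColumn n w.1.toList w.2.2.toList)
      (List.range' 0 (n + 2)).foldl
        (fun acc2 r => acc2 ++ (cols.map (fun col => col.getD r [])).flatten ++ ['\n']) acc) init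
      = init ++ (chunks.flatMap (mmBlockRows n)).flatMap (fun l => l ++ ['\n']) := by
  have h : ∀ (chunk : List (String × Int × String)) (acc : List Char),
      (List.range' 0 (n + 2)).foldl
        (fun acc2 r => acc2 ++ ((chunk.map (fun w => mmColumn n w.1.toList w.2.2.toList)).map (fun col => col.getD r [])).flatten ++ ['\n']) acc
      = acc ++ (mmBlockRows n chunk).flatMap (fun l => l ++ ['\n']) := by
    intro chunk acc
    rw [mmFoldNl]
    congr 1
    simp [mmBlockRows, List.flatMap_map]
  induction chunks generalizing init with
  | nil => simp
  | cons c cs ih =>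
      simp only [List.foldl_cons, List.flatMap_cons]
      rw [h c init, ih]
      simp [List.append_assoc, List.flatMap_append]

theorem mmNm_eq (wins : List (String × Int × String)) :
    wins.foldl (fun acc w => if w.1.toList.length > acc then w.1.toList.length else acc) 0
      = (wins.map (fun w => w.1.toList.length)).foldl max 0 := by
  rw [List.foldl_map]
  suffices h : ∀ a : Nat, wins.foldl (fun acc w => if w.1.toList.length > acc then w.1.toList.length else acc) a
      = wins.foldl (fun acc w => max acc w.1.toList.length) a from h 0
  induction wins with
  | nil => intro a; rfl
  | cons x xs ih => intro a; simp only [List.foldl_cons]; rw [ih]; congr 1; split <;> omega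

theorem mmChunkAux_nil_eq (wins : List (String × Int × String)) :
    mmChunkAux ([] : List (String × Int × String)) wins
      = (if wins.isEmpty then [([] : List (String × Int × String))] else mmChunk10 wins) := by
  cases wins with
  | nil => rfl
  | cons w ws =>
      simp only [List.isEmpty_cons, Bool.false_eq_true, if_false, mmChunkAux]
      rw [if_neg (by simp)]
      simp only [List.nil_append]
      rw [mmChunkAux_eq_chunk10 ws [w] (by simp) (by simp)]
      rfl

theorem mm_main (wins : List (String × Int × String)) (draw_name : String) (draw_count : Int)
    (total_win_points : Int) (draw_cost : Int) :
    make_message wins draw_name draw_count total_win_points draw_cost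
      = make_message_alt wins draw_name draw_count total_win_points draw_cost := by
  unfold make_message make_message_alt
  dsimp only
  rw [mmNm_eq wins]
  generalize (wins.map (fun w => w.1.toList.length)).foldl max 0 = n
  congr 1
  rw [mmFoldNl _ (fun l => l), mmBodyB]
  have h0 := mmFoldA n wins [] [] (by simp) (dvd_zero _)
  simp only [List.nil_append, List.length_nil] at h0
  rw [← mmBlockRows_nil] at *
  rw [h0, mmChunkAux_nil_eq]
  simp [List.append_assoc]

-- ===== VERDICT (by name: the statement is the Claim_ definition above) =====
theorem make_message_spec : Claim_equal_make_message := by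
  intro wins draw_name draw_count total_win_points draw_cost _
  unfold Spec_make_message
  exact mm_main wins draw_name draw_count total_win_points draw_cost
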